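-- pv_equiv track=rewrite | github.com/ivandda/dnd-currency-manager | app/utils/transactions.py | divide_money_evenly
-- ===== SOURCE A (Python) =====
-- def divide_money_evenly(total_money, num_people):
--     if num_people <= 0:
--         raise ValueError("Number of people must be greater than 0")
--     amount_per_person = total_money // num_people
--
--     residue = total_money % num_people
--
--     amounts = [amount_per_person] * num_people
--
--     for i in range(residue):
--         amounts[i] += 1
--
--     return amounts
-- ===== SOURCE B (Python) =====
-- def divide_money_evenly(total_money, num_people):
--     if num_people <= 0:
--         raise ValueError("Number of people must be greater than 0")
--     amounts = []
--     remaining = total_money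
--     for people_left in range(num_people, 0, -1):
--         share = -(-remaining // people_left)  # ceiling division: fair share for the next person
--         amounts.append(share)
--         remaining -= share
--     return amounts
-- ===== Notes on version B (the rewrite author's own statement) =====
-- stated objective: alternative
-- what changed: B never computes a global quotient/remainder split: it hands out shares one person at a time, each person receiving the ceiling of remaining/people_left in a single countdown loop with a running remainder.
import Mathlib
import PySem

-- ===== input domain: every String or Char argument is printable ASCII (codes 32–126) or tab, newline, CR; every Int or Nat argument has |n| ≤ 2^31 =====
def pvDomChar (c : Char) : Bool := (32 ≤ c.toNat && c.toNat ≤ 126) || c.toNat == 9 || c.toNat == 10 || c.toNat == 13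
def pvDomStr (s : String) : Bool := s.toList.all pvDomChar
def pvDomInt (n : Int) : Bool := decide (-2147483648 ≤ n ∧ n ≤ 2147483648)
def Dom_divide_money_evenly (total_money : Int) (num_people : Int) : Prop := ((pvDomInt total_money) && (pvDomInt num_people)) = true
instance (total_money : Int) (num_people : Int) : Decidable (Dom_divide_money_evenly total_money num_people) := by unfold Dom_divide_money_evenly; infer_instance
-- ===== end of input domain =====

-- B gives each person in turn the ceiling of remaining/people_left in a single sequential pass, instead of a uniform quotient list patched by a remainder loop (objective: alternative).


-- ===== PORT A =====
-- transliteration of A: uniform list of size num_people, then for i in range(residue): amounts[i] += 1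
def divide_money_evenly (total_money : Int) (num_people : Int) : List Int :=
  let amount_per_person := PySem.Int.floordiv total_money num_people
  let residue := PySem.Int.mod total_money num_people
  let amounts := List.replicate num_people.toNat amount_per_person
  (PySem.List.pyRange 0 residue 1).foldl
    (fun acc i => PySem.List.pySetD acc i (PySem.List.pyGetD acc i 0 + 1)) amounts

-- ===== PORT B =====
-- transliteration of B's loop body: share = -(-remaining // people_left); amounts.append(share); remaining -= share
def bStep (st : List Int × Int) (people_left : Int) : List Int × Int :=
  let share := -(PySem.Int.floordiv (-st.2) people_left)
  (st.1 ++ [share], st.2 - share)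

-- transliteration of B: for people_left in range(num_people, 0, -1): bStep
def divide_money_evenly_alt (total_money : Int) (num_people : Int) : List Int :=
  ((PySem.List.pyRange num_people 0 (-1)).foldl bStep ([], total_money)).1

-- ===== PRECONDITION & SPEC =====
-- A raises ValueError when num_people <= 0; those inputs are excluded.
def Pre_divide_money_evenly (total_money : Int) (num_people : Int) : Prop := 0 < num_people
instance (total_money : Int) (num_people : Int) : Decidable (Pre_divide_money_evenly total_money num_people) := by unfold Pre_divide_money_evenly; infer_instance
def pvWitness_divide_money_evenly : Int × Int := (10, 3)

def Spec_divide_money_evenly (total_money : Int) (num_people : Int) (out : List Int) : Prop := out = divide_money_evenly_alt total_money num_people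
instance (total_money : Int) (num_people : Int) (out : List Int) : Decidable (Spec_divide_money_evenly total_money num_people out) := by unfold Spec_divide_money_evenly; infer_instance

-- ===== CLAIM (what is proved, stated in full; the proofs are below) =====
def Claim_equal_divide_money_evenly : Prop := ∀ (total_money : Int) (num_people : Int), Dom_divide_money_evenly total_money num_people → Pre_divide_money_evenly total_money num_people → Spec_divide_money_evenly total_money num_people (divide_money_evenly total_money num_people)

-- ===== LEMMAS AND PROOFS =====

-- A's patch loop over range(k) on a uniform list of length m yields the two-segment list.
theorem fill_loop (per : Int) (k m : Nat) (hkm : k ≤ m) :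
    (PySem.List.pyRange 0 (k : Int) 1).foldl
      (fun acc i => PySem.List.pySetD acc i (PySem.List.pyGetD acc i 0 + 1))
      (List.replicate m per)
    = List.replicate k (per + 1) ++ List.replicate (m - k) per := by
  induction k with
  | zero => simp
  | succ k ih =>
    have hk : (((k + 1 : Nat)) : Int) = (k : Int) + 1 := by push_cast; ring
    rw [hk, PySem.List.pyRange_one_succ_right (by positivity), List.foldl_append,
      ih (Nat.le_of_succ_le hkm)]
    simp only [List.foldl_cons, List.foldl_nil, PySem.List.pySetD_natCast,
      PySem.List.pyGetD_natCast]
    have hlt : k < m := hkm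
    have hget : (List.replicate k (per + 1) ++ List.replicate (m - k) per).getD k 0 = per := by
      simp [List.getD, Nat.sub_pos_of_lt hlt]
    rw [hget, List.set_append]
    simp only [List.length_replicate, lt_irrefl, Nat.sub_self]
    have hrep : (List.replicate (m - k) per).set 0 (per + 1)
        = (per + 1) :: List.replicate (m - (k + 1)) per := by
      obtain ⟨j, hj⟩ : ∃ j, m - k = j + 1 := ⟨m - (k + 1), by omega⟩
      rw [hj]
      simp [List.replicate_succ]
      omega
    rw [hrep, List.replicate_succ']
    simp

-- B's countdown loop, started at k people with t money, appends exactly the front-loaded two-segment split of t among k.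
theorem b_loop (k : Nat) (hk : 0 < k) (t : Int) (acc : List Int) :
    ((PySem.List.pyRange (k : Int) 0 (-1)).foldl bStep (acc, t)).1
    = acc ++ List.replicate (PySem.Int.mod t k).toNat (PySem.Int.floordiv t k + 1)
          ++ List.replicate (k - (PySem.Int.mod t k).toNat) (PySem.Int.floordiv t k) := by
  induction k generalizing t acc with
  | zero => omega
  | succ k ih =>
    set n : Int := ((k + 1 : Nat) : Int) with hndef
    have hne : n = (k : Int) + 1 := by rw [hndef]; push_cast; ring
    have hn : (0 : Int) < n := by rw [hne]; positivity
    have hk0 : (0 : Int) ≤ (k : Int) := by positivity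
    set q : Int := PySem.Int.floordiv t n with hqdef
    set r : Int := PySem.Int.mod t n with hrdef
    have hqr : q * n + r = t := PySem.Int.floordiv_mul_add_mod t n
    have hr0 : 0 ≤ r := PySem.Int.mod_nonneg t hn
    have hrn : r < n := PySem.Int.mod_lt t hn
    rw [hne] at hqr hrn
    have hqr' : q * (k : Int) + q + r = t := by nlinarith [hqr]
    -- the first share is the ceiling of t / n
    have hshare : -(PySem.Int.floordiv (-t) n) = (if r = 0 then q else q + 1) := by
      rw [PySem.Int.neg_floordiv_neg_eq_iff_of_pos hn, hne]
      split_ifs with h0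
      · constructor <;> nlinarith
      · have hrpos : 0 < r := by omega
        constructor <;> nlinarith
    have hstep : bStep (acc, t) n = (acc ++ [if r = 0 then q else q + 1],
        t - (if r = 0 then q else q + 1)) := by
      simp only [bStep]; rw [hshare]
    have hsub : n - 1 = (k : Int) := by omega
    rw [PySem.List.pyRange_neg_one_cons hn, List.foldl_cons, hstep, hsub]
    by_cases hkz : k = 0
    · -- last person: the range after this step is empty
      subst hkz
      have hr : r = 0 := by
        have h1 : r < 1 := by simpa using hrn
        omega
      have hq : q = t := by
        simp only [Nat.cast_zero, mul_zero, zero_add] at hqr'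
        omega
      simp [hr, hq, PySem.List.pyRange_neg_one_eq_nil (le_refl (0:Int))]
    · have hkpos : 0 < k := Nat.pos_of_ne_zero hkz
      have hki : (0 : Int) < (k : Int) := by exact_mod_cast hkpos
      by_cases h0 : r = 0
      · -- even split: remaining is q*k, everyone left gets q
        simp only [h0, if_pos]
        rw [ih hkpos]
        have hq' : PySem.Int.floordiv (t - q) (k : Int) = q := by
          rw [PySem.Int.floordiv_eq_iff_of_pos hki]
          constructor <;> nlinarith
        have hr' : PySem.Int.mod (t - q) (k : Int) = 0 := by
          have h := PySem.Int.floordiv_mul_add_mod (t - q) (k : Int)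
          rw [hq'] at h; linarith
        rw [hq', hr']
        simp [List.replicate_succ]
      · -- remainder left: this person takes q+1, k people split t-(q+1) with remainder r-1
        have hrpos : 0 < r := by omega
        simp only [h0, if_false]
        rw [ih hkpos]
        have hq' : PySem.Int.floordiv (t - (q + 1)) (k : Int) = q := by
          rw [PySem.Int.floordiv_eq_iff_of_pos hki]
          constructor <;> nlinarith
        have hr' : PySem.Int.mod (t - (q + 1)) (k : Int) = r - 1 := by
          have h := PySem.Int.floordiv_mul_add_mod (t - (q + 1)) (k : Int)
          rw [hq'] at h; linarith
        rw [hq', hr']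
        have h1 : (r - 1).toNat + 1 = r.toNat := by omega
        have h2 : k + 1 - r.toNat = k - (r - 1).toNat := by omega
        rw [h2, ← h1, List.replicate_succ]
        simp

theorem divide_money_evenly_eq (total_money num_people : Int) (h : 0 < num_people) :
    divide_money_evenly total_money num_people = divide_money_evenly_alt total_money num_people := by
  unfold divide_money_evenly divide_money_evenly_alt
  have hr0 : 0 ≤ PySem.Int.mod total_money num_people := PySem.Int.mod_nonneg _ h
  have hrn : PySem.Int.mod total_money num_people < num_people := PySem.Int.mod_lt _ h
  set r := PySem.Int.mod total_money num_people with hrdef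
  have hcast : r = ((r.toNat : Nat) : Int) := (Int.toNat_of_nonneg hr0).symm
  have hle : r.toNat ≤ num_people.toNat := by omega
  have hnp : num_people = ((num_people.toNat : Nat) : Int) := by omega
  rw [hnp, b_loop num_people.toNat (by omega) total_money []]
  rw [← hnp, ← hrdef]
  calc (PySem.List.pyRange 0 r 1).foldl
        (fun acc i => PySem.List.pySetD acc i (PySem.List.pyGetD acc i 0 + 1))
        (List.replicate num_people.toNat (PySem.Int.floordiv total_money num_people))
      = List.replicate r.toNat (PySem.Int.floordiv total_money num_people + 1) ++
          List.replicate (num_people.toNat - r.toNat) (PySem.Int.floordiv total_money num_people) := by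
        rw [hcast]; exact fill_loop _ _ _ hle
    _ = _ := by simp

-- ===== VERDICT (by name: the statement is the Claim_ definition above) =====
theorem divide_money_evenly_spec : Claim_equal_divide_money_evenly := by
  intro t n _ hpre
  exact divide_money_evenly_eq t n hpre
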